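-- pv_equiv track=rewrite | github.com/jkmin3/2024Fall_projects | tent_and_tree_solver.py | are_w_connected
-- ===== SOURCE A (Python) =====
-- from collections import deque
--
-- def are_w_connected(grid, positions):
-- 	# Find all 'W' positions
-- 	rows, cols = len(grid), len(grid[0])
-- 	w_positions = positions.get('W', [])
-- 	if not w_positions:
-- 		return True  # No 'W's, so they are trivially connected.
--
-- 	# Start BFS from the first 'W' found
-- 	visited = set()
-- 	queue = deque([w_positions[0]])
--
-- 	visited.add(w_positions[0])
--
--
-- 	while queue:
-- 		position = queue.popleft()
-- 		for orth_water in connecting_positions(position):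
-- 			if orth_water not in visited:
-- 				if orth_water in positions['0'] or orth_water in positions['W']:  # '0' can be used as connectors
-- 					queue.append(orth_water)
-- 					visited.add(orth_water)
--
-- 	# Check if all 'W's were visited
-- 	return all(pos in visited for pos in w_positions)
--
-- def connecting_positions(pos, diagonal=False):
-- 	x, y = pos[0], pos[1]
-- 	possible_positions = [(x+1,y), (x,y+1), (x-1, y), (x, y-1)]
-- 	if diagonal:
-- 		possible_positions.extend([(x-1, y+1), (x-1, y-1), (x+1, y+1), (x+1, y-1)])
-- 	return possible_positions
-- ===== SOURCE B (Python) =====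
-- def are_w_connected(grid, positions):
-- 	rows, cols = len(grid), len(grid[0])
-- 	w_positions = positions.get('W', [])
-- 	if not w_positions:
-- 		return True  # No 'W's, so they are trivially connected.
--
-- 	# Saturate the connected component of the first 'W' by fixpoint iteration
-- 	# over the water cells ('0' and 'W'), instead of a BFS queue.
-- 	water = positions['0'] + positions['W']
-- 	comp = {w_positions[0]}
-- 	for _ in range(len(water)):
-- 		new_comp = comp | {c for c in water
-- 		                   if any(abs(c[0] - p[0]) + abs(c[1] - p[1]) == 1 for p in comp)}
-- 		if new_comp == comp:
-- 			break
-- 		comp = new_comp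
--
-- 	return all(pos in comp for pos in w_positions)
-- ===== Notes on version B (the rewrite author's own statement) =====
-- stated objective: alternative
-- what changed: Replaces the BFS queue/visited traversal by fixpoint saturation: repeatedly add every water cell Manhattan-adjacent (|dx|+|dy|==1) to the current component until nothing changes, instead of popping a queue and generating the four neighbours of each cell.
import Mathlib
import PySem

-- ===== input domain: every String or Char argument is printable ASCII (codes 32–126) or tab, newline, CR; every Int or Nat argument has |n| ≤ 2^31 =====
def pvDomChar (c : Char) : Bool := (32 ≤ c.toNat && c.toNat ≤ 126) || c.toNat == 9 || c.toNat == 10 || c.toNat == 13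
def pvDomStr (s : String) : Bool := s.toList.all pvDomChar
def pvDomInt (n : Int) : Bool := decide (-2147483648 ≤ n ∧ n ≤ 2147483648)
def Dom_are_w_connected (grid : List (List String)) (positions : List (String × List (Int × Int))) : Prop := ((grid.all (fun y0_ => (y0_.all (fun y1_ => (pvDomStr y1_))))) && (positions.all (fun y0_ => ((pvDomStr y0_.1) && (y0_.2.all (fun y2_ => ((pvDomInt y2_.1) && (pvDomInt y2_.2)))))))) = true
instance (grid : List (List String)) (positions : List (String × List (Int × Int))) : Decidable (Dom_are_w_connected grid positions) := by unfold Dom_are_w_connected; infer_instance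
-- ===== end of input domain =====

-- B replaces A's BFS queue/visited traversal by fixpoint saturation of the component
-- over the water cells (alternative algorithm, similar cost); equivalence of the
-- return values is proved on Pre_ (grid nonempty, and '0' a key when 'W' is nonempty).

-- ===== PORT A =====
def connecting_positions (pos : Int × Int) : List (Int × Int) :=
  [(pos.1 + 1, pos.2), (pos.1, pos.2 + 1), (pos.1 - 1, pos.2), (pos.1, pos.2 - 1)]

-- one step of A's inner 'for orth in connecting_positions(position)' body
def pvPush (p0 pW : List (Int × Int)) (qv : List (Int × Int) × List (Int × Int))
    (orth : Int × Int) : List (Int × Int) × List (Int × Int) :=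
  if orth ∈ qv.2 then qv
  else if orth ∈ p0 ∨ orth ∈ pW then (qv.1 ++ [orth], qv.2 ++ [orth])
  else qv

-- A's 'while queue:' loop; fuel only makes the recursion structural, it is chosen
-- large enough (proved below) that it never runs out where Python terminates.
def pvBfs (p0 pW : List (Int × Int)) :
    Nat → List (Int × Int) → List (Int × Int) → List (Int × Int)
  | 0, _, visited => visited
  | _ + 1, [], visited => visited
  | fuel + 1, position :: rest, visited =>
    let qv := (connecting_positions position).foldl (pvPush p0 pW) (rest, visited)
    pvBfs p0 pW fuel qv.1 qv.2

def are_w_connected (grid : List (List String)) (positions : List (String × List (Int × Int))) : Bool :=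
  match grid with
  | [] => false  -- len(grid[0]) raises IndexError; excluded by Pre_
  | _ :: _ =>
    let w_positions := (PySem.Dict.mk positions).getD "W" []
    match w_positions with
    | [] => true
    | w0 :: _ =>
      match (PySem.Dict.mk positions).get? "0" with
      | none => false  -- positions['0'] raises KeyError; excluded by Pre_
      | some p0 =>
        -- positions['W'] in the loop equals w_positions ('W' is a key: getD returned a nonempty list)
        let visited := pvBfs p0 w_positions (p0.length + w_positions.length + 1) [w0] [w0]
        w_positions.all (fun pos => decide (pos ∈ visited))

-- ===== PORT B =====
-- comp | {c for c in water if any(abs(c[0]-p[0])+abs(c[1]-p[1])==1 for p in comp)}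
def pvGrow (water comp : List (Int × Int)) : List (Int × Int) :=
  water.foldl
    (fun s c =>
      if comp.any (fun p => (c.1 - p.1).natAbs + (c.2 - p.2).natAbs == 1)
      then PySem.Set.add s c else s)
    comp

-- B's 'for _ in range(len(water))' loop with its early 'break' on a fixpoint
def pvSaturate (water : List (Int × Int)) : Nat → List (Int × Int) → List (Int × Int)
  | 0, comp => comp
  | m + 1, comp =>
    let newComp := pvGrow water comp
    if newComp = comp then comp else pvSaturate water m newComp

def are_w_connected_alt (grid : List (List String)) (positions : List (String × List (Int × Int))) : Bool :=
  match grid with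
  | [] => false  -- len(grid[0]) raises IndexError; excluded by Pre_
  | _ :: _ =>
    let w_positions := (PySem.Dict.mk positions).getD "W" []
    match w_positions with
    | [] => true
    | w0 :: _ =>
      match (PySem.Dict.mk positions).get? "0" with
      | none => false  -- positions['0'] raises KeyError; excluded by Pre_
      | some p0 =>
        let water := p0 ++ w_positions
        let comp := pvSaturate water water.length [w0]
        w_positions.all (fun pos => decide (pos ∈ comp))

-- ===== PRECONDITION & SPEC =====
-- Pre_ excludes exactly the inputs where A (and B alike) raises: an empty grid
-- (len(grid[0]) is an IndexError) and a nonempty 'W' entry without a '0' key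
-- (positions['0'] is a KeyError).
def Pre_are_w_connected (grid : List (List String)) (positions : List (String × List (Int × Int))) : Prop :=
  grid ≠ [] ∧
    ((PySem.Dict.mk positions).getD "W" [] ≠ [] → (PySem.Dict.mk positions).get? "0" ≠ none)
instance (grid : List (List String)) (positions : List (String × List (Int × Int))) : Decidable (Pre_are_w_connected grid positions) := by unfold Pre_are_w_connected; infer_instance

def pvWitness_are_w_connected : List (List String) × (List (String × List (Int × Int))) :=
  ([["W"]], [("W", [((0 : Int), (0 : Int))]), ("0", [])])

def Spec_are_w_connected (grid : List (List String)) (positions : List (String × List (Int × Int))) (out : Bool) : Prop := out = are_w_connected_alt grid positions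
instance (grid : List (List String)) (positions : List (String × List (Int × Int))) (out : Bool) : Decidable (Spec_are_w_connected grid positions out) := by unfold Spec_are_w_connected; infer_instance

-- ===== CLAIM (what is proved, stated in full; the proofs are below) =====
def Claim_equal_are_w_connected : Prop := ∀ (grid : List (List String)) (positions : List (String × List (Int × Int))), Dom_are_w_connected grid positions → Pre_are_w_connected grid positions → Spec_are_w_connected grid positions (are_w_connected grid positions)

-- ===== LEMMAS AND PROOFS =====

-- orthogonal adjacency and one water step; reachability from the first 'W'
def pvAdj (p q : Int × Int) : Prop := (q.1 - p.1).natAbs + (q.2 - p.2).natAbs = 1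
def pvStep (water : List (Int × Int)) (p q : Int × Int) : Prop := q ∈ water ∧ pvAdj p q
def pvReach (water : List (Int × Int)) (w0 q : Int × Int) : Prop :=
  Relation.ReflTransGen (pvStep water) w0 q

lemma pvMem_connecting (p q : Int × Int) : q ∈ connecting_positions p ↔ pvAdj p q := by
  simp [connecting_positions, pvAdj, Prod.ext_iff]
  omega

-- a set that contains w0, is sound for reachability and closed under steps IS the reachable set
lemma pvMem_iff_reach (water : List (Int × Int)) (w0 : Int × Int) (S : List (Int × Int))
    (hw0 : w0 ∈ S)
    (hsound : ∀ p ∈ S, pvReach water w0 p)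
    (hclosed : ∀ p ∈ S, ∀ q, pvStep water p q → q ∈ S) :
    ∀ x, x ∈ S ↔ pvReach water w0 x := by
  intro x
  constructor
  · exact hsound x
  · intro hr
    induction hr with
    | refl => exact hw0
    | tail _ h2 ih => exact hclosed _ ih _ h2

lemma pvNodup_subset_length_le {v L : List (Int × Int)} (hnd : v.Nodup) (hsub : v ⊆ L) :
    v.length ≤ L.dedup.length :=
  (hnd.subperm (fun _ hx => List.mem_dedup.mpr (hsub hx))).length_le

-- what A's inner neighbour loop does to (queue, visited)
lemma pvPush_fold_spec (p0 pW : List (Int × Int)) :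
    ∀ (orths q v : List (Int × Int)), ∃ added,
      orths.foldl (pvPush p0 pW) (q, v) = (q ++ added, v ++ added) ∧
      (∀ x ∈ added, x ∈ orths ∧ x ∈ p0 ++ pW ∧ x ∉ v) ∧
      (∀ x ∈ orths, x ∈ p0 ++ pW → x ∈ v ++ added) ∧
      (v.Nodup → (v ++ added).Nodup) := by
  intro orths
  induction orths with
  | nil => intro q v; exact ⟨[], by simp, by simp, by simp, by simp⟩
  | cons o os ih =>
    intro q v
    by_cases hov : o ∈ v
    · obtain ⟨added, heq, h1, h2, h3⟩ := ih q v
      refine ⟨added, ?_, ?_, ?_, h3⟩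
      · have hstep : pvPush p0 pW (q, v) o = (q, v) := by
          unfold pvPush; rw [if_pos hov]
        simpa [hstep] using heq
      · intro x hx
        obtain ⟨m, w, nv⟩ := h1 x hx
        exact ⟨List.mem_cons_of_mem _ m, w, nv⟩
      · intro x hx hw
        rcases List.mem_cons.mp hx with rfl | hx'
        · exact List.mem_append_left _ hov
        · exact h2 x hx' hw
    · by_cases how : o ∈ p0 ++ pW
      · obtain ⟨added, heq, h1, h2, h3⟩ := ih (q ++ [o]) (v ++ [o])
        refine ⟨o :: added, ?_, ?_, ?_, ?_⟩
        · have hstep : pvPush p0 pW (q, v) o = (q ++ [o], v ++ [o]) := by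
            unfold pvPush; rw [if_neg hov, if_pos (List.mem_append.mp how)]
          simpa [hstep, List.append_assoc] using heq
        · intro x hx
          rcases List.mem_cons.mp hx with rfl | hx'
          · exact ⟨List.mem_cons_self, how, hov⟩
          · obtain ⟨m, w, nv⟩ := h1 x hx'
            refine ⟨List.mem_cons_of_mem _ m, w, fun hxv => nv ?_⟩
            exact List.mem_append_left _ hxv
        · intro x hx hw
          rcases List.mem_cons.mp hx with rfl | hx'
          · simp
          · have := h2 x hx' hw
            simpa [List.append_assoc] using this
        · intro hnd
          have : (v ++ [o]).Nodup := by
            rw [List.nodup_append]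
            refine ⟨hnd, List.nodup_singleton o, ?_⟩
            intro x hx y hy
            rw [List.mem_singleton] at hy
            subst hy
            exact fun hxy => hov (hxy ▸ hx)
          simpa [List.append_assoc] using h3 this
      · obtain ⟨added, heq, h1, h2, h3⟩ := ih q v
        refine ⟨added, ?_, ?_, ?_, h3⟩
        · have hstep : pvPush p0 pW (q, v) o = (q, v) := by
            unfold pvPush
            rw [if_neg hov, if_neg (fun h => how (List.mem_append.mpr h))]
          simpa [hstep] using heq
        · intro x hx
          obtain ⟨m, w, nv⟩ := h1 x hx
          exact ⟨List.mem_cons_of_mem _ m, w, nv⟩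
        · intro x hx hw
          rcases List.mem_cons.mp hx with rfl | hx'
          · exact absurd hw how
          · exact h2 x hx' hw

-- A's BFS returns exactly the reachable set, given enough fuel
lemma pvBfs_spec (p0 pW : List (Int × Int)) (w0 : Int × Int) :
    ∀ (fuel : Nat) (queue visited : List (Int × Int)),
      visited.Nodup →
      w0 ∈ visited →
      queue ⊆ visited →
      visited ⊆ w0 :: (p0 ++ pW) →
      (∀ p ∈ visited, pvReach (p0 ++ pW) w0 p) →
      (∀ p ∈ visited, p ∉ queue → ∀ q, pvStep (p0 ++ pW) p q → q ∈ visited) →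
      (w0 :: (p0 ++ pW)).dedup.length + queue.length ≤ fuel + visited.length →
      ∀ x, x ∈ pvBfs p0 pW fuel queue visited ↔ pvReach (p0 ++ pW) w0 x := by
  intro fuel
  induction fuel with
  | zero =>
    intro queue visited hnd hw0 hqs hvs hre hcl hlen
    have hvlen : visited.length ≤ (w0 :: (p0 ++ pW)).dedup.length :=
      pvNodup_subset_length_le hnd hvs
    have hq : queue = [] := by
      have : queue.length = 0 := by omega
      exact List.length_eq_zero_iff.mp this
    subst hq
    exact pvMem_iff_reach _ _ _ hw0 hre
      (fun p hp q hst => hcl p hp (List.not_mem_nil) q hst)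
  | succ fuel ih =>
    intro queue visited hnd hw0 hqs hvs hre hcl hlen
    match queue with
    | [] =>
      exact pvMem_iff_reach _ _ _ hw0 hre
        (fun p hp q hst => hcl p hp (List.not_mem_nil) q hst)
    | position :: rest =>
      obtain ⟨added, heq, h1, h2, h3⟩ :=
        pvPush_fold_spec p0 pW (connecting_positions position) rest visited
      have hposv : position ∈ visited := hqs (List.mem_cons_self)
      have hstep : pvBfs p0 pW (fuel + 1) (position :: rest) visited
          = pvBfs p0 pW fuel (rest ++ added) (visited ++ added) := by
        simp only [pvBfs, heq]
      rw [hstep]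
      apply ih
      · exact h3 hnd
      · exact List.mem_append_left _ hw0
      · intro x hx
        rcases List.mem_append.mp hx with hx' | hx'
        · exact List.mem_append_left _ (hqs (List.mem_cons_of_mem _ hx'))
        · exact List.mem_append_right _ hx'
      · intro x hx
        rcases List.mem_append.mp hx with hx' | hx'
        · exact hvs hx'
        · exact List.mem_cons_of_mem _ (h1 x hx').2.1
      · intro x hx
        rcases List.mem_append.mp hx with hx' | hx'
        · exact hre x hx'
        · obtain ⟨hm, hw, _⟩ := h1 x hx'
          exact Relation.ReflTransGen.tail (hre position hposv)
            ⟨hw, (pvMem_connecting position x).mp hm⟩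
      · intro p hp hnq q hst
        rcases List.mem_append.mp hp with hp' | hp'
        · by_cases hpp : p = position
          · subst hpp
            exact h2 q ((pvMem_connecting p q).mpr hst.2) hst.1
          · have hpr : p ∉ rest := fun h => hnq (List.mem_append_left _ h)
            have hpq : p ∉ position :: rest := by
              intro h
              rcases List.mem_cons.mp h with h' | h'
              · exact hpp h'
              · exact hpr h'
            exact List.mem_append_left _ (hcl p hp' hpq q hst)
        · exact absurd (List.mem_append_right rest hp') hnq
      · simp only [List.length_append, List.length_cons] at *
        omega

-- one saturation round of B: what the filtered union adds
lemma pvGrow_fold_spec (comp : List (Int × Int)) :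
    ∀ (ws s : List (Int × Int)), ∃ e,
      ws.foldl
        (fun s c =>
          if comp.any (fun p => (c.1 - p.1).natAbs + (c.2 - p.2).natAbs == 1)
          then PySem.Set.add s c else s) s = s ++ e ∧
      (∀ x ∈ e, x ∈ ws ∧ ∃ p ∈ comp, pvAdj p x) ∧
      (∀ c ∈ ws, (∃ p ∈ comp, pvAdj p c) → c ∈ s ++ e) ∧
      (s.Nodup → (s ++ e).Nodup) := by
  intro ws
  induction ws with
  | nil => intro s; exact ⟨[], by simp, by simp, by simp, by simp⟩
  | cons c cs ih =>
    intro s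
    have hcond : (comp.any (fun p => (c.1 - p.1).natAbs + (c.2 - p.2).natAbs == 1)) = true
        ↔ ∃ p ∈ comp, pvAdj p c := by
      simp [List.any_eq_true, pvAdj]
    by_cases hb : (comp.any (fun p => (c.1 - p.1).natAbs + (c.2 - p.2).natAbs == 1)) = true
    · by_cases hcs : c ∈ s
      · obtain ⟨e, heq, h1, h2, h3⟩ := ih s
        refine ⟨e, ?_, ?_, ?_, h3⟩
        · simpa [hb, PySem.Set.add_of_mem hcs] using heq
        · intro x hx
          obtain ⟨m, w⟩ := h1 x hx
          exact ⟨List.mem_cons_of_mem _ m, w⟩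
        · intro x hx hadj
          rcases List.mem_cons.mp hx with rfl | hx'
          · exact List.mem_append_left _ hcs
          · exact h2 x hx' hadj
      · obtain ⟨e, heq, h1, h2, h3⟩ := ih (s ++ [c])
        refine ⟨c :: e, ?_, ?_, ?_, ?_⟩
        · simpa [hb, PySem.Set.add_of_not_mem hcs, List.append_assoc] using heq
        · intro x hx
          rcases List.mem_cons.mp hx with rfl | hx'
          · exact ⟨List.mem_cons_self, hcond.mp hb⟩
          · obtain ⟨m, w⟩ := h1 x hx'
            exact ⟨List.mem_cons_of_mem _ m, w⟩
        · intro x hx hadj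
          rcases List.mem_cons.mp hx with rfl | hx'
          · simp
          · simpa [List.append_assoc] using h2 x hx' hadj
        · intro hnd
          have : (s ++ [c]).Nodup := by
            rw [List.nodup_append]
            refine ⟨hnd, List.nodup_singleton c, ?_⟩
            intro x hx y hy
            rw [List.mem_singleton] at hy
            subst hy
            exact fun hxy => hcs (hxy ▸ hx)
          simpa [List.append_assoc] using h3 this
    · obtain ⟨e, heq, h1, h2, h3⟩ := ih s
      refine ⟨e, ?_, ?_, ?_, h3⟩
      · simpa [hb] using heq
      · intro x hx
        obtain ⟨m, w⟩ := h1 x hx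
        exact ⟨List.mem_cons_of_mem _ m, w⟩
      · intro x hx hadj
        rcases List.mem_cons.mp hx with rfl | hx'
        · exact absurd (hcond.mpr hadj) hb
        · exact h2 x hx' hadj

-- B's saturation loop returns exactly the reachable set
lemma pvSaturate_spec (water : List (Int × Int)) (w0 : Int × Int) :
    ∀ (m : Nat) (comp : List (Int × Int)),
      comp.Nodup →
      w0 ∈ comp →
      comp ⊆ w0 :: water →
      (∀ p ∈ comp, pvReach water w0 p) →
      (w0 :: water).dedup.length ≤ m + comp.length →
      ∀ x, x ∈ pvSaturate water m comp ↔ pvReach water w0 x := by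
  intro m
  induction m with
  | zero =>
    intro comp hnd hw0 hsub hre hlen
    have hup : comp.length ≤ (w0 :: water).dedup.length :=
      pvNodup_subset_length_le hnd hsub
    have hperm : comp.Perm (w0 :: water).dedup := by
      have hsp : List.Subperm comp ((w0 :: water).dedup) :=
        hnd.subperm (fun _ hx => List.mem_dedup.mpr (hsub hx))
      exact hsp.perm_of_length_le (by omega)
    have hall : ∀ y ∈ w0 :: water, y ∈ comp := by
      intro y hy
      exact hperm.mem_iff.mpr (List.mem_dedup.mpr hy)
    exact pvMem_iff_reach _ _ _ hw0 hre
      (fun p _ q hst => hall q (List.mem_cons_of_mem _ hst.1))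
  | succ m ih =>
    intro comp hnd hw0 hsub hre hlen
    obtain ⟨e, heq, h1, h2, h3⟩ := pvGrow_fold_spec comp water comp
    have hgrow : pvGrow water comp = comp ++ e := heq
    by_cases hfix : pvGrow water comp = comp
    · have hres : pvSaturate water (m + 1) comp = comp := by
        simp only [pvSaturate, hfix, if_pos]
      rw [hres]
      have he : e = [] := by
        have : comp ++ e = comp := hgrow ▸ hfix
        simpa using congrArg List.length this
      refine pvMem_iff_reach _ _ _ hw0 hre ?_
      intro p hp q hst
      have := h2 q hst.1 ⟨p, hp, hst.2⟩
      simpa [he] using this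
    · have hres : pvSaturate water (m + 1) comp
        = pvSaturate water m (pvGrow water comp) := by
        simp only [pvSaturate, hfix, if_false]
      rw [hres, hgrow]
      have hene : e ≠ [] := by
        intro h; exact hfix (by simpa [h] using hgrow)
      apply ih
      · exact h3 hnd
      · exact List.mem_append_left _ hw0
      · intro x hx
        rcases List.mem_append.mp hx with hx' | hx'
        · exact hsub hx'
        · exact List.mem_cons_of_mem _ (h1 x hx').1
      · intro x hx
        rcases List.mem_append.mp hx with hx' | hx'
        · exact hre x hx'
        · obtain ⟨hm, p, hp, hadj⟩ := h1 x hx'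
          exact Relation.ReflTransGen.tail (hre p hp) ⟨hm, hadj⟩
      · have : 1 ≤ e.length := by
          cases e with
          | nil => exact absurd rfl hene
          | cons _ _ => simp
        simp only [List.length_append]
        omega

-- ===== VERDICT (by name: the statement is the Claim_ definition above) =====
theorem are_w_connected_spec : Claim_equal_are_w_connected := by
  intro grid positions _ hpre
  obtain ⟨hg, hkey⟩ := hpre
  unfold Spec_are_w_connected
  cases grid with
  | nil => exact absurd rfl hg
  | cons g gs =>
    rcases hw : (PySem.Dict.mk positions).getD "W" [] with _ | ⟨w0, wrest⟩
    · simp only [are_w_connected, are_w_connected_alt, hw]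
    · rcases hp : (PySem.Dict.mk positions).get? "0" with _ | p0
      · exact absurd hp (by simp [hw] at hkey ⊢; exact hkey)
      · simp only [are_w_connected, are_w_connected_alt, hw, hp]
        have hA := pvBfs_spec p0 (w0 :: wrest) w0
          (p0.length + (w0 :: wrest).length + 1) [w0] [w0]
          (List.nodup_singleton _) (List.mem_singleton_self _)
          (fun x hx => hx)
          (by intro x hx; rw [List.mem_singleton] at hx; subst hx; exact List.mem_cons_self)
          (by intro p hp; rw [List.mem_singleton] at hp; subst hp; exact Relation.ReflTransGen.refl)
          (by intro p hp hq; rw [List.mem_singleton] at hp; subst hp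
              exact absurd (List.mem_singleton_self _) hq)
          (by have := (List.dedup_sublist (w0 :: (p0 ++ w0 :: wrest))).length_le
              simp only [List.length_cons, List.length_append] at *
              omega)
        have hB := pvSaturate_spec (p0 ++ w0 :: wrest) w0
          (p0 ++ w0 :: wrest).length [w0]
          (List.nodup_singleton _) (List.mem_singleton_self _)
          (by intro x hx; rw [List.mem_singleton] at hx; subst hx; exact List.mem_cons_self)
          (by intro p hp; rw [List.mem_singleton] at hp; subst hp; exact Relation.ReflTransGen.refl)
          (by have := (List.dedup_sublist (w0 :: (p0 ++ w0 :: wrest))).length_le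
              simp only [List.length_cons, List.length_append] at *
              omega)
        refine List.all_congr rfl ?_
        intro pos
        exact decide_eq_decide.mpr ((hA pos).trans (hB pos).symm)
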